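-- pv_equiv track=rewrite | github.com/pypi-data/pypi-mirror-398 | packages/eqword2llm/eqword2llm-0.5.0-py3-none-any.whl/eqword2llm/table_converter.py | _escape_pipes_outside_math
-- ===== SOURCE A (Python) =====
-- def _escape_pipes_outside_math(text: str) -> str:
--     """Escape pipe characters outside of math expressions.
--
--     Pipe characters inside $...$ are part of LaTeX and should not be escaped.
--     """
--     result: list[str] = []
--     in_math = False
--     i = 0
--
--     while i < len(text):
--         if text[i] == "$":
--             # Toggle math mode (handle $$ and $ the same way for this purpose)
--             in_math = not in_math
--             result.append(text[i])
--         elif text[i] == "|" and not in_math: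
--             # Escape pipe outside math
--             result.append("\\|")
--         else:
--             result.append(text[i])
--         i += 1
--
--     return "".join(result)
-- ===== SOURCE B (Python) =====
-- def _escape_pipes_outside_math(text: str) -> str:
--     """Escape pipe characters outside of math expressions.
--
--     Split on "$": even-indexed segments are outside math, odd-indexed inside.
--     """
--     segments = text.split("$")
--     processed = [seg.replace("|", "\\|") if i % 2 == 0 else seg
--                  for i, seg in enumerate(segments)]
--     return "$".join(processed)
-- ===== Notes on version B (the rewrite author's own statement) =====
-- stated objective: idiomatic
-- what changed: Replaced the char-by-char while loop with an in_math toggle by splitting on the dollar delimiter, escaping pipes only in even-indexed (outside-math) segments, then joining the segments back.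
import Mathlib
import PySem

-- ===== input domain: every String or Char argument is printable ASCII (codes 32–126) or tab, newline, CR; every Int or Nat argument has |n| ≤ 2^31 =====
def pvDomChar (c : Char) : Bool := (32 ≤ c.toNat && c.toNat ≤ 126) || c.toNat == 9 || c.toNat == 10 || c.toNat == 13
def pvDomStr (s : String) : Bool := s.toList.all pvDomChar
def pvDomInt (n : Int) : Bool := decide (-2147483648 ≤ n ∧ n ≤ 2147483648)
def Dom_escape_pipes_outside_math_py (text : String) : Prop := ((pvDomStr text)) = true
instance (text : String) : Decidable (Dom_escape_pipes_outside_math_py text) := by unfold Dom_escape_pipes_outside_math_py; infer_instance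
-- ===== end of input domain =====

-- B replaces A's char-by-char while loop (in_math toggle) by split on the dollar delimiter + escape even-indexed segments + join (idiomatic; measured faster by a constant factor: str built-ins instead of a per-char Python loop).

-- ===== PORT A =====
-- one loop step of A's while loop: state = (in_math, result)
def pvStepA (st : Bool × List String) (c : Char) : Bool × List String :=
  if c = '$' then (!st.1, st.2 ++ [String.ofList [c]])
  else if c = '|' && !st.1 then (st.1, st.2 ++ ["\\|"])
  else (st.1, st.2 ++ [String.ofList [c]])

def escape_pipes_outside_math_py (text : String) : String :=
  PySem.Str.join "" (text.toList.foldl pvStepA (false, [])).2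

-- ===== PORT B =====
def escape_pipes_outside_math_py_alt (text : String) : String :=
  let segments := (PySem.Chars.splitOn text.toList ['$']).map String.ofList
  let processed := (PySem.List.enumerate segments 0).map
    (fun p => if PySem.Int.mod p.1 2 = 0 then PySem.Str.replace p.2 "|" "\\|" else p.2)
  PySem.Str.join "$" processed

-- ===== PRECONDITION & SPEC =====
def Spec_escape_pipes_outside_math_py (text : String) (out : String) : Prop := out = escape_pipes_outside_math_py_alt text
instance (text : String) (out : String) : Decidable (Spec_escape_pipes_outside_math_py text out) := by unfold Spec_escape_pipes_outside_math_py; infer_instance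

-- ===== CLAIM (what is proved, stated in full; the proofs are below) =====
def Claim_equal_escape_pipes_outside_math_py : Prop := ∀ (text : String), Dom_escape_pipes_outside_math_py text → Spec_escape_pipes_outside_math_py text (escape_pipes_outside_math_py text)

-- ===== LEMMAS AND PROOFS =====

-- A's loop, directly on chars
def escA : List Char → Bool → List Char
  | [], _ => []
  | c :: cs, b =>
    if c = '$' then '$' :: escA cs (!b)
    else (if c = '|' && !b then ['\\', '|'] else [c]) ++ escA cs b

-- pipe-escaping of one segment (what replace "|" "\\|" does)
def escPipe : List Char → List Char
  | [] => []
  | c :: cs => (if c = '|' then ['\\', '|'] else [c]) ++ escPipe cs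

-- split on '$' : (first segment, remaining segments)
def splitD : List Char → List Char × List (List Char)
  | [] => ([], [])
  | c :: cs => if c = '$' then ([], (splitD cs).1 :: (splitD cs).2) else (c :: (splitD cs).1, (splitD cs).2)

-- joined tail: each remaining segment preceded by '$', escaped according to alternating flag
def tailB : Bool → List (List Char) → List Char
  | _, [] => []
  | b, s :: rest => '$' :: (cond b (escPipe s) s) ++ tailB (!b) rest

def procList (b : Bool) (L : List (List Char)) : List Char :=
  match L with
  | [] => []
  | s :: rest => (cond b (escPipe s) s) ++ tailB (!b) rest

lemma join_nil_eq_flatten (L : List (List Char)) : PySem.Chars.join [] L = L.flatten := by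
  simp [PySem.Chars.join, List.intercalate]
  induction L with
  | nil => simp
  | cons s rest ih => cases rest <;> simp_all [List.intersperse]

lemma foldA (cs : List Char) : ∀ (b : Bool) (res : List String),
    ((cs.foldl pvStepA (b, res)).2.map String.toList).flatten
      = (res.map String.toList).flatten ++ escA cs b := by
  induction cs with
  | nil => intro b res; simp [escA]
  | cons c cs ih =>
    intro b res
    by_cases h1 : c = '$'
    · subst h1
      simp [pvStepA, escA, List.foldl_cons, ih]
    · by_cases h2 : c = '|' && !b
      · simp [pvStepA, h1, h2, escA, List.foldl_cons, ih]
      · simp [pvStepA, h1, h2, escA, List.foldl_cons, ih]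

lemma replace_go_pipe (l : List Char) : ∀ (fuel : Nat) (acc : List Char), l.length ≤ fuel →
    PySem.Chars.replace.go ['|'] ['\\', '|'] fuel l acc = acc.reverse ++ escPipe l := by
  induction l with
  | nil =>
    intro fuel acc _
    cases fuel <;> simp [PySem.Chars.replace.go, escPipe]
  | cons c t ih =>
    intro fuel acc hf
    cases fuel with
    | zero => simp at hf
    | succ f =>
      by_cases hc : c = '|'
      · subst hc
        have : List.isPrefixOf ['|'] ('|' :: t) = true := by simp [List.isPrefixOf]
        conv_lhs => rw [PySem.Chars.replace.go]
        simp only [this, if_true]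
        rw [show List.drop (['|'] : List Char).length ('|' :: t) = t from rfl,
          ih f _ (by simpa using hf)]
        simp [escPipe]
      · have hp : List.isPrefixOf ['|'] (c :: t) = false := by
          simp [List.isPrefixOf]; exact fun h => hc h.symm
        conv_lhs => rw [PySem.Chars.replace.go]
        simp only [hp, Bool.false_eq_true, if_false, ih f _ (by simpa using hf)]
        simp [escPipe, hc]

lemma replace_pipe (s : List Char) : PySem.Chars.replace s ['|'] ['\\', '|'] = escPipe s := by
  rw [PySem.Chars.replace]
  simp only [List.isEmpty_cons, if_false, Bool.false_eq_true]
  exact replace_go_pipe s s.length [] (le_refl _)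

lemma split_go (l : List Char) : ∀ (fuel : Nat) (cur : List Char) (acc : List (List Char)),
    l.length ≤ fuel →
    PySem.Chars.splitOn.go ['$'] fuel l cur acc
      = acc.reverse ++ (cur.reverse ++ (splitD l).1) :: (splitD l).2 := by
  induction l with
  | nil =>
    intro fuel cur acc _
    cases fuel <;> simp [PySem.Chars.splitOn.go, splitD]
  | cons c t ih =>
    intro fuel cur acc hf
    cases fuel with
    | zero => simp at hf
    | succ f =>
      by_cases hc : c = '$'
      · subst hc
        have hp : List.isPrefixOf ['$'] ('$' :: t) = true := by simp [List.isPrefixOf]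
        conv_lhs => rw [PySem.Chars.splitOn.go]
        simp only [hp, if_true]
        rw [show List.drop (['$'] : List Char).length ('$' :: t) = t from rfl,
          ih f _ _ (by simpa using hf)]
        simp [splitD]
      · have hp : List.isPrefixOf ['$'] (c :: t) = false := by
          simp [List.isPrefixOf]; exact fun h => hc h.symm
        conv_lhs => rw [PySem.Chars.splitOn.go]
        simp only [hp, Bool.false_eq_true, if_false]
        rw [ih f _ _ (by simpa using hf)]
        simp [splitD, hc]

lemma splitOn_dollar (cs : List Char) :
    PySem.Chars.splitOn cs ['$'] = (splitD cs).1 :: (splitD cs).2 := by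
  rw [PySem.Chars.splitOn, split_go cs (cs.length + 1) [] [] (by omega)]
  simp

lemma escA_eq (cs : List Char) : ∀ b : Bool,
    escA cs b = (cond (!b) (escPipe (splitD cs).1) (splitD cs).1) ++ tailB b (splitD cs).2 := by
  induction cs with
  | nil => intro b; cases b <;> simp [escA, splitD, tailB, escPipe]
  | cons c t ih =>
    intro b
    by_cases hc : c = '$'
    · subst hc
      simp only [escA, if_true, splitD, tailB, ih (!b), Bool.not_not]
      cases b <;> simp [escPipe]
    · by_cases hb : b
      · subst hb
        simp [escA, hc, splitD, ih true]
      · simp only [Bool.not_eq_true] at hb; subst hb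
        simp only [escA, hc, if_false, splitD, ih false, Bool.not_false, cond_true, escPipe]
        by_cases hp : c = '|' <;> simp [hp]

lemma Bjoin : ∀ (L : List (List Char)) (n : Nat),
    PySem.Chars.join ['$'] (((PySem.List.enumerate (L.map String.ofList) ((n : Nat) : Int)).map
        (fun p => if PySem.Int.mod p.1 2 = 0 then PySem.Str.replace p.2 "|" "\\|" else p.2)).map
      String.toList)
    = procList (decide (n % 2 = 0)) L := by
  intro L
  induction L with
  | nil => intro n; simp [PySem.Chars.join, List.intercalate, procList]
  | cons s rest ih =>
    intro n
    have hmod : (PySem.Int.mod ((n : Nat) : Int) 2 = 0) ↔ (n % 2 = 0) := by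
      rw [show ((2 : Int)) = ((2 : Nat) : Int) from rfl, PySem.Int.mod_natCast]
      exact_mod_cast Int.natCast_eq_zero
    have hhead : ∀ p : Int × String, p = ((n : Int), String.ofList s) →
        ((if PySem.Int.mod p.1 2 = 0 then PySem.Str.replace p.2 "|" "\\|" else p.2)).toList
          = cond (decide (n % 2 = 0)) (escPipe s) s := by
      intro p hp; subst hp
      by_cases h : n % 2 = 0
      · simp only [hmod.mpr h, if_true, h, decide_true, cond_true, PySem.Str.toList_replace,
          String.toList_ofList]
        exact replace_pipe s
      · rw [if_neg (by rw [hmod]; exact h)]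
        simp [h]
    have hflip : decide ((n + 1) % 2 = 0) = !decide (n % 2 = 0) := by
      by_cases h : n % 2 = 0 <;> simp [h] <;> omega
    rw [List.map_cons, PySem.List.enumerate_cons, List.map_cons, List.map_cons]
    rw [hhead _ rfl]
    rw [show ((n : Int) + 1) = (((n + 1 : Nat)) : Int) by push_cast; ring]
    cases rest with
    | nil =>
      simp [PySem.Chars.join, List.intercalate, procList, tailB]
    | cons s2 r2 =>
      have ihr := ih (n + 1)
      rw [List.map_cons, PySem.List.enumerate_cons, List.map_cons, List.map_cons] at ihr
      rw [List.map_cons, PySem.List.enumerate_cons, List.map_cons, List.map_cons,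
        PySem.Chars.join_cons_cons, ihr, hflip]
      cases hb : decide (n % 2 = 0) <;>
        simp [procList, tailB]

lemma A_toList (t : String) :
    (escape_pipes_outside_math_py t).toList = escA t.toList false := by
  unfold escape_pipes_outside_math_py
  rw [PySem.Str.join, String.toList_ofList,
    show (("" : String).toList = ([] : List Char)) by decide, join_nil_eq_flatten]
  have := foldA t.toList false []
  simpa using this

lemma B_toList (t : String) :
    (escape_pipes_outside_math_py_alt t).toList
      = procList true ((splitD t.toList).1 :: (splitD t.toList).2) := by
  unfold escape_pipes_outside_math_py_alt
  rw [PySem.Str.join, String.toList_ofList,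
    show (("$" : String).toList = (['$'] : List Char)) by decide, splitOn_dollar, List.map_map]
  have := Bjoin ((splitD t.toList).1 :: (splitD t.toList).2) 0
  simp only [Nat.cast_zero, Nat.zero_mod, decide_true] at this
  rw [← this]
  simp [Function.comp]

theorem escape_pipes_outside_math_py_spec : Claim_equal_escape_pipes_outside_math_py := by
  intro text _
  unfold Spec_escape_pipes_outside_math_py
  apply String.toList_inj.mp
  rw [A_toList, B_toList, escA_eq]
  simp [procList]
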